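-- pv_equiv track=rewrite | github.com/Domiko7/competitive-programming | practice/logia/zolw_jeszcze_Raz.py | ile
-- ===== SOURCE A (Python) =====
-- def ile(n):
--     predkosc = 1
--     for i in range(1, n):
--         if i % 2 == 1:
--             predkosc += 3
--         else:
--             if i % 12 == 0:
--                 predkosc -= 10
--             else:
--                 predkosc -= 1
--     return predkosc
-- ===== SOURCE B (Python) =====
-- def ile(n):
--     m = max(n - 1, 0)
--     return 1 + 3 * ((m + 1) // 2) - m // 2 - 9 * (m // 12)
-- ===== Notes on version B (the rewrite author's own statement) =====
-- stated objective: faster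
-- what changed: Replaces the O(n) loop over range(1,n) by a closed-form count of odd numbers, even numbers and multiples of 12 in [1, n-1].
import Mathlib
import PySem

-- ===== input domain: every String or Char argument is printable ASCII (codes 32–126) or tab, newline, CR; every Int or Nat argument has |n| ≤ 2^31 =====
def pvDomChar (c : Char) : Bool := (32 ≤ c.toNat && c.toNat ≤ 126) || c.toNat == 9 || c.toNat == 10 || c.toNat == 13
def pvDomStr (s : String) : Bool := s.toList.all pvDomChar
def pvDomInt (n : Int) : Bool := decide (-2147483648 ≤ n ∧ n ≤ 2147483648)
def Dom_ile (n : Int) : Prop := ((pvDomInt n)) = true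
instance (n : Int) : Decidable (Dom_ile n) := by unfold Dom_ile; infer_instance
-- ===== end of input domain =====

-- B replaces the O(n) loop by a closed-form count of odds, evens and multiples of 12 in [1, n-1] (asymptotically faster).


-- ===== PORT A =====
def ileStep (predkosc : Int) (i : Int) : Int :=
  if PySem.Int.mod i 2 = 1 then predkosc + 3
  else if PySem.Int.mod i 12 = 0 then predkosc - 10
  else predkosc - 1

def ile (n : Int) : Int :=
  (PySem.List.pyRange 1 n 1).foldl ileStep 1

-- ===== PORT B =====
def ile_alt (n : Int) : Int :=
  let m := max (n - 1) 0
  1 + 3 * PySem.Int.floordiv (m + 1) 2 - PySem.Int.floordiv m 2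
    - 9 * PySem.Int.floordiv m 12

-- ===== PRECONDITION & SPEC =====
def Spec_ile (n : Int) (out : Int) : Prop := out = ile_alt n
instance (n : Int) (out : Int) : Decidable (Spec_ile n out) := by unfold Spec_ile; infer_instance

-- ===== CLAIM (what is proved, stated in full; the proofs are below) =====
def Claim_equal_ile : Prop := ∀ (n : Int), Dom_ile n → Spec_ile n (ile n)

-- ===== LEMMAS AND PROOFS =====

-- closed form of B, as a function of m = n - 1 (clamped to 0)
def gClosed (m : Int) : Int :=
  1 + 3 * ((m + 1) / 2) - m / 2 - 9 * (m / 12)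

lemma ile_alt_eq_gClosed (n : Int) : ile_alt n = gClosed (max (n - 1) 0) := by
  unfold ile_alt gClosed
  simp only [PySem.Int.floordiv_eq_ediv_of_pos (by omega : (0:Int) < 2),
      PySem.Int.floordiv_eq_ediv_of_pos (by omega : (0:Int) < 12)]

lemma ileStep_gClosed (k : Int) :
    ileStep (gClosed k) (1 + k) = gClosed (k + 1) := by
  unfold ileStep gClosed
  simp only [PySem.Int.mod_eq_emod_of_pos (by omega : (0:Int) < 2),
      PySem.Int.mod_eq_emod_of_pos (by omega : (0:Int) < 12)]
  split_ifs with h1 h2 <;> omega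

lemma fold_eq (k : Nat) :
    (PySem.List.pyRange 1 (1 + (k : Int)) 1).foldl ileStep 1 = gClosed k := by
  induction k with
  | zero =>
      rw [PySem.List.pyRange_one_eq_nil (by omega)]
      simp [gClosed]
  | succ k ih =>
      have h : (1 : Int) + ((k : Int) + 1) = (1 + (k : Int)) + 1 := by ring
      push_cast
      rw [h, PySem.List.pyRange_one_succ_right (by omega)]
      rw [List.foldl_append, ih]
      simpa using ileStep_gClosed (k : Int)

-- ===== VERDICT (by name: the statement is the Claim_ definition above) =====
theorem ile_spec : Claim_equal_ile := by
  intro n _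
  unfold Spec_ile ile
  rw [ile_alt_eq_gClosed]
  by_cases h : n ≤ 1
  · rw [PySem.List.pyRange_one_eq_nil h]
    have : max (n - 1) 0 = 0 := by omega
    simp [this, gClosed]
  · obtain ⟨k, hk⟩ : ∃ k : Nat, n = 1 + (k : Int) := ⟨(n - 1).toNat, by omega⟩
    rw [hk]
    have hm : max (1 + (k : Int) - 1) 0 = (k : Int) := by omega
    rw [hm, fold_eq]
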